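-- pv_equiv track=rewrite | github.com/NetherlandsForensicInstitute/xsqlite | xsqlite/_recovery.py | _observed_typecodes
-- ===== SOURCE A (Python) =====
-- from collections import Counter as _Counter
--
-- def _observed_typecodes(tcodes):
--     ''' count occurence of typecodes in each column in the sequence of typecodes
--
--     This function is used to determine for each column how often each typecode
--     occurs. This is done by merging all typecodes in a specific column into a
--     Counter object, that counts the occurence of each serialtype value per
--     column. This allows us to detect invariants throughout all records that can
--     be used for the recovery. In addition we can build a signature from this
--     that can be used for signature based recovery.
--
--     Consider these typecodes:
--
--         (0, 65, 9, 37, 1, 8)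
--         (0, 65, 8, 37, 1, 6)
--         (0, 65, 8, 37, 1, 6, 6)
--         (0, 64, 8, 35, 1, 8, 6, 0)
--
--     One observation that can be made is that the total number of columns may
--     vary between records. This is caused by the ALTER TABLE statement by which
--     columns can be added. These added columns will have a default value, which
--     is used to retreive their value for already stored records. This means that
--     the old records are not updated and we can have records of varying length.
--
--     However, since we know that new columns are only added at the end, we can
--     still collect them in one list, since the common first columns always have
--     the same meaning within the allocated (and removed) records. So, in the
--     above example we would get the following result:
--
--         [Counter({0:4}, Counter({65:3, 64:1}), ... , Counter({6:2}), Counter({0,1})]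
--     '''
--
--     counters = []
--     for tcode in tcodes:
--         # make sure we have the proper amount of Counters and update as we encounter
--         # wider records
--         if len(counters) != len(tcode):
--             added_columns = len(tcode) - len(counters)
--             for i in range(added_columns):
--                 counters.append(_Counter())
--         # and update their values
--         for idx, tcode in enumerate(tcode):
--             counters[idx].update([tcode])
--     return counters
-- ===== SOURCE B (Python) =====
-- from collections import Counter as _Counter
--
-- def _observed_typecodes(tcodes):
--     # column-major: one Counter per column, built directly from that column's values
--     width = max((len(t) for t in tcodes), default=0)
--     return [_Counter(t[i] for t in tcodes if len(t) > i) for i in range(width)]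
-- ===== Notes on version B (the rewrite author's own statement) =====
-- stated objective: simpler
-- what changed: Replaces A's row-major loop that grows and mutates a list of Counters in place with a column-major construction: compute the maximum record width once, then build each column's Counter directly from that column's values.
import Mathlib
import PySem

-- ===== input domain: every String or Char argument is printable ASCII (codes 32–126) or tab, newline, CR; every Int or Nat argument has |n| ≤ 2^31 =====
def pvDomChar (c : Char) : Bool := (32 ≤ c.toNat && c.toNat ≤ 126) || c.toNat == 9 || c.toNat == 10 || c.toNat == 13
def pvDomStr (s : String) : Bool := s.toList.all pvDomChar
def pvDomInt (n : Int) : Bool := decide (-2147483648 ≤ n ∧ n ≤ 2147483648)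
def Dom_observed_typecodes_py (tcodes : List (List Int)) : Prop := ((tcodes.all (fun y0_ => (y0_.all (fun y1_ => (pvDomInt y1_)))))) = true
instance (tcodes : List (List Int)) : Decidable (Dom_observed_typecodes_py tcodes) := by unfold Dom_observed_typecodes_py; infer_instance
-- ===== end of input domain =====

-- B builds the result column-major (one Counter per column, straight from that column's
-- values) instead of A's row-major loop that grows and updates a list of Counters; simpler.

-- ===== PORT A =====
-- loop body of A's `for tcode in tcodes`; Counters are PySem.Dict Int Int.
-- `range(added_columns)` with negative `added_columns` is empty, as is the Nat subtraction here.
-- `counters[idx].update([v])` = read counters[idx], bump key v by 1, write back; idx is always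
-- in range after the padding step (proved below), so the total pyGetD/pySetD forms are exact.
def pvStepA (counters : List (PySem.Dict Int Int)) (tcode : List Int) :
    List (PySem.Dict Int Int) :=
  (PySem.List.enumerate tcode 0).foldl
    (fun cs p =>
      PySem.List.pySetD cs p.1
        ((PySem.List.pyGetD cs p.1 PySem.Dict.empty).modify p.2 0 (· + 1)))
    (if counters.length ≠ tcode.length then
      (List.range (tcode.length - counters.length)).foldl
        (fun cs _ => cs ++ [(PySem.Dict.empty : PySem.Dict Int Int)]) counters
    else counters)

def observed_typecodes_py (tcodes : List (List Int)) : List (List (Int × Int)) :=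
  (tcodes.foldl pvStepA ([] : List (PySem.Dict Int Int))).map PySem.Dict.items

-- ===== PORT B =====
-- width = max((len(t) for t in tcodes), default=0);
-- column i's Counter is built from `t[i] for t in tcodes if len(t) > i` (= filterMap t[i]?).
def observed_typecodes_py_alt (tcodes : List (List Int)) : List (List (Int × Int)) :=
  let width := tcodes.foldl (fun w t => max w t.length) 0
  (List.range width).map (fun i =>
    (PySem.Dict.counter (tcodes.filterMap (fun t => t[i]?))).items)

-- ===== PRECONDITION & SPEC =====
def Spec_observed_typecodes_py (tcodes : List (List Int)) (out : List (List (Int × Int))) : Prop := out = observed_typecodes_py_alt tcodes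
instance (tcodes : List (List Int)) (out : List (List (Int × Int))) : Decidable (Spec_observed_typecodes_py tcodes out) := by unfold Spec_observed_typecodes_py; infer_instance

-- ===== CLAIM (what is proved, stated in full; the proofs are below) =====
def Claim_equal_observed_typecodes_py : Prop := ∀ (tcodes : List (List Int)), Dom_observed_typecodes_py tcodes → Spec_observed_typecodes_py tcodes (observed_typecodes_py tcodes)

-- ===== LEMMAS AND PROOFS =====

-- what processing one record does to column i (B's view of A's loop body)
def pvColStep (i : Nat) (d : PySem.Dict Int Int) (t : List Int) : PySem.Dict Int Int :=
  if i < t.length then d.modify (t.getD i 0) 0 (· + 1) else d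

theorem pv_append_fold (n : Nat) (cs : List (PySem.Dict Int Int)) :
    (List.range n).foldl (fun cs _ => cs ++ [(PySem.Dict.empty : PySem.Dict Int Int)]) cs
      = cs ++ List.replicate n PySem.Dict.empty := by
  induction n with
  | zero => simp
  | succ n ih =>
      simp [List.range_succ, List.foldl_append, ih, List.replicate_succ']

theorem pv_pad_eq (cs : List (PySem.Dict Int Int)) (t : List Int) :
    (if cs.length ≠ t.length then
      (List.range (t.length - cs.length)).foldl
        (fun cs _ => cs ++ [(PySem.Dict.empty : PySem.Dict Int Int)]) cs
    else cs) = cs ++ List.replicate (t.length - cs.length) PySem.Dict.empty := by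
  split_ifs with h
  · exact pv_append_fold _ _
  · have h0 : t.length - cs.length = 0 := by omega
    simp [h0]

theorem pv_getD_pad (cs : List (PySem.Dict Int Int)) (n i : Nat) :
    (cs ++ List.replicate n PySem.Dict.empty).getD i PySem.Dict.empty
      = cs.getD i PySem.Dict.empty := by
  rcases Nat.lt_or_ge i cs.length with h | h
  · rw [List.getD_append _ _ _ _ h]
  · rw [List.getD_eq_default _ _ h]
    rcases Nat.lt_or_ge i (cs.length + n) with h2 | h2
    · rw [List.getD_eq_getElem _ _ (by simpa using h2)]
      simp [List.getElem_append_right h]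
    · rw [List.getD_eq_default]
      simpa using h2

theorem pv_upd_len (t : List (Int × Int)) (cs : List (PySem.Dict Int Int)) :
    (t.foldl
      (fun cs p =>
        PySem.List.pySetD cs p.1
          ((PySem.List.pyGetD cs p.1 PySem.Dict.empty).modify p.2 0 (· + 1)))
      cs).length = cs.length := by
  induction t generalizing cs with
  | nil => rfl
  | cons x xs ih => simp [ih, PySem.List.length_pySetD]

theorem pv_upd_getD (t : List Int) (s : Nat) (cs : List (PySem.Dict Int Int))
    (hlen : s + t.length ≤ cs.length) (i : Nat) :
    ((PySem.List.enumerate t (s : Int)).foldl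
      (fun cs p =>
        PySem.List.pySetD cs p.1
          ((PySem.List.pyGetD cs p.1 PySem.Dict.empty).modify p.2 0 (· + 1)))
      cs).getD i PySem.Dict.empty
      = if s ≤ i ∧ i < s + t.length then
          (cs.getD i PySem.Dict.empty).modify (t.getD (i - s) 0) 0 (· + 1)
        else cs.getD i PySem.Dict.empty := by
  induction t generalizing s cs with
  | nil =>
      simp only [PySem.List.enumerate, List.foldl_nil]
      rw [if_neg (by simp only [List.length_nil]; omega)]
  | cons x xs ih =>
      simp only [List.length_cons] at hlen
      have hs : s < cs.length := by omega
      simp only [PySem.List.enumerate, List.foldl_cons]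
      have hcast : (s : Int) + 1 = ((s + 1 : Nat) : Int) := by push_cast; ring
      rw [hcast]
      set cs' := PySem.List.pySetD cs (s : Int)
        ((PySem.List.pyGetD cs (s : Int) PySem.Dict.empty).modify x 0 (· + 1)) with hcs'
      have hlen' : (s + 1) + xs.length ≤ cs'.length := by
        rw [hcs', PySem.List.length_pySetD]; omega
      rw [ih (s + 1) cs' hlen']
      have hget : ∀ m : Nat, cs'.getD m PySem.Dict.empty
          = if m = s then (cs.getD s PySem.Dict.empty).modify x 0 (· + 1)
            else cs.getD m PySem.Dict.empty := by
        intro m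
        rw [← PySem.List.pyGetD_natCast cs' m, hcs',
          PySem.List.pyGetD_pySetD_natCast cs s m _ _ hs]
        split_ifs <;> rw [PySem.List.pyGetD_natCast]
      by_cases h2 : i = s
      · subst h2
        rw [if_neg (by omega), hget, if_pos rfl, if_pos (by simp)]
        simp
      · by_cases hin : s ≤ i ∧ i < s + (x :: xs).length
        · have hin' : (s + 1) ≤ i ∧ i < (s + 1) + xs.length := by
            simp only [List.length_cons] at hin; omega
          rw [if_pos hin', hget, if_neg h2, if_pos hin]
          have hk : i - s = (i - (s + 1)) + 1 := by omega
          rw [hk]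
          rfl
        · have hin' : ¬ ((s + 1) ≤ i ∧ i < (s + 1) + xs.length) := by
            simp only [List.length_cons] at hin ⊢; omega
          rw [if_neg hin', hget, if_neg h2, if_neg hin]

theorem pv_upd_getD0 (t : List Int) (cs : List (PySem.Dict Int Int))
    (hlen : t.length ≤ cs.length) (i : Nat) :
    ((PySem.List.enumerate t 0).foldl
      (fun cs p =>
        PySem.List.pySetD cs p.1
          ((PySem.List.pyGetD cs p.1 PySem.Dict.empty).modify p.2 0 (· + 1)))
      cs).getD i PySem.Dict.empty
      = if i < t.length then
          (cs.getD i PySem.Dict.empty).modify (t.getD i 0) 0 (· + 1)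
        else cs.getD i PySem.Dict.empty := by
  have h := pv_upd_getD t 0 cs (by omega) i
  simpa using h

theorem pv_stepA_len (cs : List (PySem.Dict Int Int)) (t : List Int) :
    (pvStepA cs t).length = max cs.length t.length := by
  unfold pvStepA
  rw [pv_pad_eq, pv_upd_len]
  simp
  omega

theorem pv_stepA_getD (cs : List (PySem.Dict Int Int)) (t : List Int) (i : Nat) :
    (pvStepA cs t).getD i PySem.Dict.empty
      = pvColStep i (cs.getD i PySem.Dict.empty) t := by
  unfold pvStepA pvColStep
  rw [pv_pad_eq, pv_upd_getD0 _ _ (by simp; omega)]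
  simp only [pv_getD_pad]

theorem pv_main (rows : List (List Int)) (cs : List (PySem.Dict Int Int)) :
    rows.foldl pvStepA cs
      = (List.range (rows.foldl (fun w t => max w t.length) cs.length)).map
          (fun i => rows.foldl (pvColStep i) (cs.getD i PySem.Dict.empty)) := by
  induction rows generalizing cs with
  | nil =>
      simp only [List.foldl_nil]
      apply List.ext_getElem (by simp)
      intro j h1 h2
      simp only [List.getElem_map, List.getElem_range]
      rw [List.getD_eq_getElem]
  | cons t rest ih =>
      simp only [List.foldl_cons]
      rw [ih (pvStepA cs t)]
      have hl : rest.foldl (fun w t => max w t.length) (pvStepA cs t).length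
          = rest.foldl (fun w t => max w t.length) (max cs.length t.length) := by
        rw [pv_stepA_len]
      rw [hl]
      congr 1
      funext i
      rw [pv_stepA_getD]

theorem pv_counter_col (tcodes : List (List Int)) (i : Nat) :
    PySem.Dict.counter (tcodes.filterMap (fun t => t[i]?))
      = tcodes.foldl (pvColStep i) PySem.Dict.empty := by
  rw [PySem.Dict.counter_eq_foldl, List.foldl_filterMap]
  congr 1
  funext d t
  unfold pvColStep
  rcases h : t[i]? with _ | v
  · rw [if_neg (by have := List.getElem?_eq_none_iff.mp h; omega)]
  · obtain ⟨hlt, hv⟩ := List.getElem?_eq_some_iff.mp h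
    rw [if_pos hlt]
    have hgd : t.getD i 0 = v := by
      rw [List.getD_eq_getElem _ _ hlt, hv]
    rw [hgd]

-- ===== VERDICT (by name: the statement is the Claim_ definition above) =====
theorem observed_typecodes_py_spec : Claim_equal_observed_typecodes_py := by
  intro tcodes _
  unfold Spec_observed_typecodes_py observed_typecodes_py observed_typecodes_py_alt
  rw [pv_main tcodes []]
  simp only [List.map_map]
  apply List.map_congr_left
  intro i _
  simp only [Function.comp]
  rw [pv_counter_col]
  rfl
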